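-- pv_equiv track=rewrite | github.com/OGBots/og | pattern_matcher.py | find_matching_patterns
-- ===== SOURCE A (Python) =====
-- from typing import List, Dict, Optional
--
-- def find_matching_patterns(patterns: Dict[str, str], results: List[str]) -> List[str]:
--     """
--     Find patterns that match with the given results
--
--     Args:
--         patterns: Dictionary of pattern -> prediction mappings
--         results: List of recent game results
--
--     Returns:
--         List of predicted outcomes from matching patterns
--     """
--     if not patterns or not results:
--         return []
--
--     matches = []
--     results_str = ','.join(results)
--
--     for pattern_str, prediction in patterns.items():
--         pattern = pattern_str.split(',')
--         pattern_len = len(pattern)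
--
--         # Skip patterns longer than results
--         if pattern_len > len(results):
--             continue
--
--         # Check if any segment of results matches the pattern
--         for i in range(len(results) - pattern_len + 1):
--             segment = results[i:i + pattern_len]
--             if segment == pattern:
--                 matches.append(prediction)
--
--     return matches
-- ===== SOURCE B (Python) =====
-- def find_matching_patterns(patterns, results):
--     """Same result as A, but builds a window-occurrence counter once per distinct
--     pattern length instead of rescanning results for every pattern."""
--     n = len(results)
--     window_counts = {}
--     for L in set(len(k.split(',')) for k in patterns):
--         if L <= n:
--             c = {}
--             for i in range(n - L + 1):
--                 key = tuple(results[i:i + L])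
--                 c[key] = c.get(key, 0) + 1
--             window_counts[L] = c
--     out = []
--     for pattern_str, prediction in patterns.items():
--         p = tuple(pattern_str.split(','))
--         out += [prediction] * window_counts.get(len(p), {}).get(p, 0)
--     return out
-- ===== Notes on version B (the rewrite author's own statement) =====
-- stated objective: faster
-- what changed: Instead of rescanning all windows of results for every pattern, B builds a window-occurrence counter once per distinct pattern length and emits each prediction replicated by a single dictionary lookup.
import Mathlib
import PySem

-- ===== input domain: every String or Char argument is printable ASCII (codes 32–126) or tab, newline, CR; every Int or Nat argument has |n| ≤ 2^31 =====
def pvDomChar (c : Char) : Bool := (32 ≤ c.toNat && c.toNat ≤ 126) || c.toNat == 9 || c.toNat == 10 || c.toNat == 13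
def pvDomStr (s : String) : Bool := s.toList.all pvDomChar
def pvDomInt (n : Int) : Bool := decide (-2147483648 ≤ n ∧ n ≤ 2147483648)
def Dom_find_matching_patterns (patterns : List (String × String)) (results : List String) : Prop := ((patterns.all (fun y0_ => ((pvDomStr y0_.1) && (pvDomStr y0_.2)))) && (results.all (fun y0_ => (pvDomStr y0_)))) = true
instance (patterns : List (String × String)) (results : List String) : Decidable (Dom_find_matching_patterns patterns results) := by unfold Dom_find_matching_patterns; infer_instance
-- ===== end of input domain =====

-- B replaces A's per-pattern rescan of `results` by a window-occurrence counter built once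
-- per distinct pattern length and looked up per pattern; same output on every input.

-- ===== PORT A =====
-- s.split(',') — the separator is the literal non-empty ",", so PySem.Str.split? is always
-- `some`; `.getD []` only unwraps it (exact).
def pvSplitComma (s : String) : List String := (PySem.Str.split? s ",").getD []

def find_matching_patterns (patterns : List (String × String)) (results : List String) : List String :=
  if patterns = [] ∨ results = [] then []
  else
    -- A also builds `results_str = ','.join(results)` but never uses it; omitted (dead code)
    patterns.foldl (fun ms kv =>
      let pattern := pvSplitComma kv.1
      let pattern_len : Int := pattern.length
      if pattern_len > (results.length : Int) then ms
      else
        (PySem.List.pyRange 0 ((results.length : Int) - pattern_len + 1) 1).foldl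
          (fun m i =>
            if PySem.List.slice results (some i) (some (i + pattern_len)) == pattern then
              m ++ [kv.2]
            else m)
          ms) []

-- ===== PORT B =====
def find_matching_patterns_alt (patterns : List (String × String)) (results : List String) : List String :=
  let n : Int := (results.length : Int)
  let lengths : PySem.Set Int :=
    PySem.Set.ofList (patterns.map (fun kv => ((pvSplitComma kv.1).length : Int)))
  -- the set is iterated only to build a dict that is looked up afterwards (order-independent)
  let wc : PySem.Dict Int (PySem.Dict (List String) Int) :=
    lengths.foldl (fun w L =>
      if L ≤ n then
        w.insert L
          ((PySem.List.pyRange 0 (n - L + 1) 1).foldl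
            (fun c i =>
              let key := PySem.List.slice results (some i) (some (i + L))
              c.insert key (c.getD key 0 + 1))
            PySem.Dict.empty)
      else w) PySem.Dict.empty
  patterns.foldl (fun out kv =>
    let p := pvSplitComma kv.1
    out ++ List.replicate ((wc.getD (p.length : Int) PySem.Dict.empty).getD p 0).toNat kv.2) []

-- ===== PRECONDITION & SPEC =====
def Spec_find_matching_patterns (patterns : List (String × String)) (results : List String) (out : List String) : Prop := out = find_matching_patterns_alt patterns results
instance (patterns : List (String × String)) (results : List String) (out : List String) : Decidable (Spec_find_matching_patterns patterns results out) := by unfold Spec_find_matching_patterns; infer_instance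

-- ===== CLAIM (what is proved, stated in full; the proofs are below) =====
def Claim_equal_find_matching_patterns : Prop := ∀ (patterns : List (String × String)) (results : List String), Dom_find_matching_patterns patterns results → Spec_find_matching_patterns patterns results (find_matching_patterns patterns results)

-- ===== LEMMAS AND PROOFS =====

-- proof-side abbreviations (defeq to the subterms of the two ports)
def pvWC (patterns : List (String × String)) (results : List String) :
    PySem.Dict Int (PySem.Dict (List String) Int) :=
  (PySem.Set.ofList (patterns.map (fun kv => ((pvSplitComma kv.1).length : Int)))).foldl
    (fun w L =>
      if L ≤ (results.length : Int) then
        w.insert L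
          ((PySem.List.pyRange 0 ((results.length : Int) - L + 1) 1).foldl
            (fun c i =>
              c.insert (PySem.List.slice results (some i) (some (i + L)))
                ((c.getD (PySem.List.slice results (some i) (some (i + L))) 0) + 1))
            PySem.Dict.empty)
      else w) PySem.Dict.empty

def pvBlockA (results : List String) (kv : String × String) : List String :=
  if ((pvSplitComma kv.1).length : Int) > (results.length : Int) then []
  else
    ((PySem.List.pyRange 0 ((results.length : Int) - (pvSplitComma kv.1).length + 1) 1).filter
        (fun i =>
          PySem.List.slice results (some i) (some (i + ((pvSplitComma kv.1).length : Int))) ==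
            pvSplitComma kv.1)).map (fun _ => kv.2)

def pvBlockB (patterns : List (String × String)) (results : List String)
    (kv : String × String) : List String :=
  List.replicate
    (((pvWC patterns results).getD ((pvSplitComma kv.1).length : Int) PySem.Dict.empty).getD
        (pvSplitComma kv.1) 0).toNat kv.2

theorem pvSplit_go_ne_nil (sep : List Char) (fuel : Nat) (l cur : List Char)
    (acc : List (List Char)) : PySem.Chars.splitOn.go sep fuel l cur acc ≠ [] := by
  fun_induction PySem.Chars.splitOn.go <;> simp_all

theorem pvSplitComma_ne_nil (s : String) : pvSplitComma s ≠ [] := by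
  simp [pvSplitComma, PySem.Str.split?, PySem.Chars.split?, PySem.Chars.splitOn]
  exact pvSplit_go_ne_nil _ _ _ _ _

theorem pv_getD_foldl_insert_not_mem (n : Int) (C : Int → PySem.Dict (List String) Int)
    (ls : List Int) (L : Int) (hL : L ∉ ls) (w0 : PySem.Dict Int (PySem.Dict (List String) Int))
    (d : PySem.Dict (List String) Int) :
    (ls.foldl (fun w M => if M ≤ n then w.insert M (C M) else w) w0).getD L d = w0.getD L d := by
  induction ls generalizing w0 with
  | nil => rfl
  | cons M rest ih =>
    simp only [List.mem_cons, not_or] at hL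
    simp only [List.foldl_cons]
    rw [ih hL.2]
    split_ifs with h
    · exact PySem.Dict.getD_insert_of_ne _ _ _ hL.1
    · rfl

theorem pv_getD_foldl_insert_if (n : Int) (C : Int → PySem.Dict (List String) Int)
    (ls : List Int) (hnd : ls.Nodup) (L : Int) (hL : L ∈ ls)
    (w0 : PySem.Dict Int (PySem.Dict (List String) Int)) (d : PySem.Dict (List String) Int) :
    (ls.foldl (fun w M => if M ≤ n then w.insert M (C M) else w) w0).getD L d =
      if L ≤ n then C L else w0.getD L d := by
  induction ls generalizing w0 with
  | nil => cases hL
  | cons M rest ih =>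
    simp only [List.nodup_cons] at hnd
    simp only [List.foldl_cons]
    rcases List.mem_cons.mp hL with rfl | hmem
    · rw [pv_getD_foldl_insert_not_mem n C rest L hnd.1]
      split_ifs with h
      · simp [PySem.Dict.getD_insert_self]
      · rfl
    · have hne : L ≠ M := fun h => hnd.1 (h ▸ hmem)
      rw [ih hnd.2 hmem]
      split_ifs with h hM
      · rfl
      · exact PySem.Dict.getD_insert_of_ne _ _ _ hne
      · rfl

-- the two per-pattern blocks coincide
theorem pv_block_eq (patterns : List (String × String)) (results : List String)
    (kv : String × String) (hkv : kv ∈ patterns) :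
    pvBlockA results kv = pvBlockB patterns results kv := by
  have hmem : (((pvSplitComma kv.1).length : Int)) ∈
      PySem.Set.ofList (patterns.map (fun kv => ((pvSplitComma kv.1).length : Int))) := by
    rw [PySem.Set.mem_ofList]
    exact List.mem_map.mpr ⟨kv, hkv, rfl⟩
  unfold pvBlockA pvBlockB pvWC
  rw [pv_getD_foldl_insert_if ((results.length : Int)) _ _ (PySem.Set.nodup_ofList _) _ hmem]
  split_ifs with h1 h2
  · omega
  · -- pattern longer than results: lookup in the empty dict gives count 0
    simp [PySem.Dict.getD_empty]
  · -- counter of the window list: getD = count of the pattern among windows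
    have hc : ((PySem.List.pyRange 0 ((results.length : Int) - ((pvSplitComma kv.1).length : Int) + 1) 1).foldl
        (fun c i =>
          c.insert (PySem.List.slice results (some i) (some (i + ((pvSplitComma kv.1).length : Int))))
            ((c.getD (PySem.List.slice results (some i) (some (i + ((pvSplitComma kv.1).length : Int)))) 0) + 1))
        PySem.Dict.empty) =
        PySem.Dict.counter ((PySem.List.pyRange 0 ((results.length : Int) - ((pvSplitComma kv.1).length : Int) + 1) 1).map
          (fun i => PySem.List.slice results (some i) (some (i + ((pvSplitComma kv.1).length : Int))))) := by
      rw [← PySem.Dict.foldl_insert_getD_add_one_eq_counter, List.foldl_map]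
    rw [hc, PySem.Dict.getD_counter, List.count, List.countP_map]
    rw [List.map_const']
    congr 1
    rw [Int.toNat_natCast, ← List.countP_eq_length_filter]
    apply List.countP_congr
    intro i _
    simp [Function.comp]
  · omega

-- A's fold, rewritten per element into "append a block"
theorem pv_A_fold (patterns : List (String × String)) (results : List String)
    (acc : List String) :
    patterns.foldl (fun ms kv =>
      if ((pvSplitComma kv.1).length : Int) > (results.length : Int) then ms
      else
        (PySem.List.pyRange 0 ((results.length : Int) - ((pvSplitComma kv.1).length : Int) + 1) 1).foldl
          (fun m i =>
            if PySem.List.slice results (some i) (some (i + ((pvSplitComma kv.1).length : Int))) ==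
                pvSplitComma kv.1 then m ++ [kv.2]
            else m)
          ms) acc = acc ++ patterns.flatMap (pvBlockA results) := by
  rw [PySem.List.foldl_congr_mem' patterns _ (fun ms kv => ms ++ pvBlockA results kv) acc ?_]
  · exact PySem.List.foldl_append_eq_flatMap _ _ _
  · intro kv _ ms
    beta_reduce
    unfold pvBlockA
    split_ifs with h
    · simp
    · exact PySem.List.foldl_append_if _ _ _ _

-- B's fold is the flatMap of its blocks
theorem pv_B_fold (patterns : List (String × String)) (results : List String) :
    find_matching_patterns_alt patterns results = patterns.flatMap (pvBlockB patterns results) := by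
  unfold find_matching_patterns_alt
  rw [← List.nil_append (patterns.flatMap (pvBlockB patterns results))]
  exact PySem.List.foldl_append_eq_flatMap (pvBlockB patterns results) patterns []

-- ===== VERDICT (by name: the statement is the Claim_ definition above) =====
theorem find_matching_patterns_spec : Claim_equal_find_matching_patterns := by
  intro patterns results _
  show find_matching_patterns patterns results = find_matching_patterns_alt patterns results
  rw [pv_B_fold]
  unfold find_matching_patterns
  split_ifs with h
  · -- empty patterns, or empty results: every block is empty
    rcases h with rfl | hres
    · simp
    · subst hres
      symm
      apply List.flatMap_eq_nil_iff.mpr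
      intro kv hkv
      rw [← pv_block_eq patterns [] kv hkv]
      have h1 : 0 < (pvSplitComma kv.1).length :=
        List.length_pos_iff.mpr (pvSplitComma_ne_nil kv.1)
      unfold pvBlockA
      rw [if_pos (by simpa using by omega)]
  · rw [pv_A_fold patterns results []]
    simp only [List.nil_append]
    exact List.flatMap_congr (fun kv hkv => pv_block_eq patterns results kv hkv)
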